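-- pv_equiv track=rewrite | github.com/mario-bermonti/wdiff | wanalysis.py | swap_c_for_k_check
-- ===== SOURCE A (Python) =====
-- def swap_c_for_k_check(word):
--     """Checks how many c's in the word word sound like k's so they can be
--     swapped with k's by mistake.
--     """
--
--     cCompliantCount = 0
--     cCount = word.count("c")
--     cPositions = list()
--     start = 0
--
--     while cCount > 0:
--         cPosition = word.find("c", start)
--         cPositions.append(cPosition)
--         start = cPosition + 1
--         cCount -= 1
--
--     for position in cPositions:
--         if position == (len(word) - 1):
--             continue
--         if (word[position+1] == "a" or word[position+1] == "o" or
--                 word[position+1] == "u"):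
--             cCompliantCount += 1
--
--     return cCompliantCount
-- ===== SOURCE B (Python) =====
-- def swap_c_for_k_check(word):
--     """Checks how many c's in the word sound like k's (c followed by a/o/u)."""
--     return sum(
--         1
--         for i, ch in enumerate(word)
--         if ch == "c" and i + 1 < len(word) and word[i + 1] in "aou"
--     )
-- ===== Notes on version B (the rewrite author's own statement) =====
-- stated objective: simpler
-- what changed: B replaces A's two-phase approach (count 'c's, build a list of their positions with repeated str.find, then scan that list) with a single enumerate pass that counts c's followed by a/o/u directly, never materializing the position list.
import Mathlib
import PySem

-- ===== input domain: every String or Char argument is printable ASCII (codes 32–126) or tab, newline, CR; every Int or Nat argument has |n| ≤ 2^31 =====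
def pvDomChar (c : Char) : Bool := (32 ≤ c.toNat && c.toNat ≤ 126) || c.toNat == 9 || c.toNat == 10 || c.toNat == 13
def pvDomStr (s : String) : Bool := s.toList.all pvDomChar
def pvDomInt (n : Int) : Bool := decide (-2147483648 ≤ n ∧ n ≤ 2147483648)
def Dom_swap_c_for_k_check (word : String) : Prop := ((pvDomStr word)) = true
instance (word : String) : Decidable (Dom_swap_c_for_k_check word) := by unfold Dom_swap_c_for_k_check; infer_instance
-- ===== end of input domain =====

-- B replaces A's two passes (build a list of 'c'-positions via repeated str.find, then scan it)
-- by one enumerate pass that counts directly; objective: simpler.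


-- ===== PORT A =====
-- the while loop: runs exactly cCount times (fuel), each round word.find("c", start)
def pvFindLoop (word : String) (fuel : Nat) (start : Int) : List Int :=
  match fuel with
  | 0 => []
  | n + 1 =>
      let cPosition := PySem.Str.findFrom word "c" start none
      cPosition :: pvFindLoop word n (cPosition + 1)

def swap_c_for_k_check (word : String) : Int :=
  let cCount := PySem.Str.count word "c"
  let cPositions := pvFindLoop word cCount 0
  -- word[position+1] is always in range here (every position is a 'c' index and the
  -- last index is skipped), so the `none` case of pyGet? is never taken.
  cPositions.foldl
    (fun cCompliantCount position =>
      if position == (PySem.Str.len word : Int) - 1 then cCompliantCount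
      else if PySem.Str.pyGet? word (position + 1) == some 'a'
           || PySem.Str.pyGet? word (position + 1) == some 'o'
           || PySem.Str.pyGet? word (position + 1) == some 'u' then cCompliantCount + 1
      else cCompliantCount)
    0

-- ===== PORT B =====
def swap_c_for_k_check_alt (word : String) : Int :=
  (PySem.List.enumerate word.toList 0).foldl
    (fun acc p =>
      if p.2 == 'c' && decide (p.1 + 1 < (PySem.Str.len word : Int))
         && ((PySem.Str.pyGet? word (p.1 + 1)).elim false
               (fun ch => PySem.Chars.isIn [ch] "aou".toList)) then acc + 1
      else acc)
    0

-- ===== PRECONDITION & SPEC =====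
def Spec_swap_c_for_k_check (word : String) (out : Int) : Prop := out = swap_c_for_k_check_alt word
instance (word : String) (out : Int) : Decidable (Spec_swap_c_for_k_check word out) := by unfold Spec_swap_c_for_k_check; infer_instance

-- ===== CLAIM (what is proved, stated in full; the proofs are below) =====
def Claim_equal_swap_c_for_k_check : Prop := ∀ (word : String), Dom_swap_c_for_k_check word → Spec_swap_c_for_k_check word (swap_c_for_k_check word)

-- ===== LEMMAS AND PROOFS =====

-- the ascending list of indices of 'c' in a char list
def cIdxs : List Char → List Nat
  | [] => []
  | a :: l => if a = 'c' then 0 :: (cIdxs l).map (· + 1) else (cIdxs l).map (· + 1)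

theorem mem_cIdxs_iff (d : List Char) (i : Nat) : i ∈ cIdxs d ↔ d[i]? = some 'c' := by
  induction d generalizing i with
  | nil => simp [cIdxs]
  | cons a l ih =>
    by_cases h : a = 'c' <;> cases i <;>
      simp [cIdxs, h, List.mem_map, ih]

theorem cIdxs_head_min (d : List Char) (j : Nat) (rest : List Nat)
    (h : cIdxs d = j :: rest) : ∀ i, i < j → d[i]? ≠ some 'c' := by
  induction d generalizing j rest with
  | nil => simp [cIdxs] at h
  | cons a l ih =>
    by_cases ha : a = 'c'
    · simp [cIdxs, ha] at h
      omega
    · simp [cIdxs, ha] at h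
      cases hc : cIdxs l with
      | nil => rw [hc] at h; simp at h
      | cons j' rest' =>
        rw [hc] at h
        simp at h
        obtain ⟨hj, _⟩ := h
        intro i hi
        cases i with
        | zero => simp [ha]
        | succ i' =>
          simp only [List.getElem?_cons_succ]
          exact ih j' rest' hc i' (by omega)

theorem cIdxs_head_tail (d : List Char) (j : Nat) (rest : List Nat)
    (h : cIdxs d = j :: rest) : rest = (cIdxs (d.drop (j + 1))).map (· + (j + 1)) := by
  induction d generalizing j rest with
  | nil => simp [cIdxs] at h
  | cons a l ih =>
    by_cases ha : a = 'c'
    · simp [cIdxs, ha] at h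
      obtain ⟨hj, hrest⟩ := h
      subst hj
      simpa using hrest.symm
    · simp [cIdxs, ha] at h
      cases hc : cIdxs l with
      | nil => rw [hc] at h; simp at h
      | cons j' rest' =>
        rw [hc] at h
        simp at h
        obtain ⟨hj, hrest⟩ := h
        have := ih j' rest' hc
        subst hj
        rw [← hrest, this, List.map_map]
        apply List.map_congr_left
        intro x _
        simp [Function.comp]
        omega

theorem length_lt_of_mem_cIdxs (d : List Char) (i : Nat) (h : i ∈ cIdxs d) : i < d.length := by
  rw [mem_cIdxs_iff] at h
  exact (List.getElem?_eq_some_iff.mp h).1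

-- singleton prefix ↔ element at the front
theorem singleton_prefix_iff (ch : Char) (l : List Char) : [ch] <+: l ↔ l[0]? = some ch := by
  cases l with
  | nil => simp
  | cons a t =>
    constructor
    · rintro ⟨s, hs⟩
      simp at hs
      simp [hs.1]
    · intro h
      simp at h
      exact ⟨t, by simp [h]⟩

theorem singleton_prefix_drop_iff (ch : Char) (l : List Char) (i : Nat) :
    [ch] <+: l.drop i ↔ l[i]? = some ch := by
  rw [singleton_prefix_iff]
  simp [List.getElem?_drop]

theorem singleton_infix_iff (ch : Char) (l : List Char) : [ch] <:+: l ↔ ch ∈ l := by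
  constructor
  · intro h; exact h.mem (by simp)
  · intro h
    obtain ⟨i, hi, he⟩ := List.mem_iff_getElem.mp h
    exact (((singleton_prefix_drop_iff ch l i).mpr
      (by simp [List.getElem?_eq_getElem hi, he])).isInfix).trans (List.drop_suffix i l).isInfix

theorem cIdxs_eq_nil_iff (d : List Char) : cIdxs d = [] ↔ 'c' ∉ d := by
  constructor
  · intro h hm
    obtain ⟨i, hi, he⟩ := List.mem_iff_getElem.mp hm
    have : i ∈ cIdxs d := (mem_cIdxs_iff d i).mpr (by simp [List.getElem?_eq_getElem hi, he])
    simp [h] at this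
  · intro h
    cases hc : cIdxs d with
    | nil => rfl
    | cons j rest =>
      exfalso
      have : j ∈ cIdxs d := by simp [hc]
      rw [mem_cIdxs_iff] at this
      exact h (List.mem_of_getElem? this)

-- find for the single-char pattern "c", characterized through cIdxs
theorem find_c (d : List Char) : PySem.Chars.find d ['c'] =
    match cIdxs d with
    | [] => -1
    | j :: _ => (j : Int) := by
  cases hc : cIdxs d with
  | nil =>
    rw [PySem.Chars.find_eq_neg_one_iff, singleton_infix_iff]
    exact (cIdxs_eq_nil_iff d).mp hc
  | cons j rest =>
    show PySem.Chars.find d ['c'] = (j : Int)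
    have hmem : j ∈ cIdxs d := by simp [hc]
    have hj : d[j]? = some 'c' := (mem_cIdxs_iff d j).mp hmem
    have hnn : 0 ≤ PySem.Chars.find d ['c'] := by
      rw [PySem.Chars.find_nonneg_iff, singleton_infix_iff]
      exact List.mem_of_getElem? hj
    obtain ⟨hpre, hmin⟩ := PySem.Chars.find_spec hnn
    rw [singleton_prefix_drop_iff] at hpre
    have h1 : j ≤ (PySem.Chars.find d ['c']).toNat := by
      by_contra h
      exact cIdxs_head_min d j rest hc _ (by omega) hpre
    have h2 : ¬ j < (PySem.Chars.find d ['c']).toNat := by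
      intro h
      exact hmin j h ((singleton_prefix_drop_iff 'c' d j).mpr hj)
    omega

-- Chars.count for a single-char pattern is the number of 'c' indices
theorem count_go_c (fuel : Nat) : ∀ (l : List Char) (acc : Nat), l.length ≤ fuel →
    PySem.Chars.count.go ['c'] fuel l acc = acc + (cIdxs l).length := by
  induction fuel with
  | zero =>
    intro l acc h
    cases l with
    | nil => simp [PySem.Chars.count.go, cIdxs]
    | cons a l => simp at h
  | succ n ih =>
    intro l acc h
    cases l with
    | nil => simp [PySem.Chars.count.go, cIdxs]
    | cons a l =>
      have hl : l.length ≤ n := by simp at h; omega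
      by_cases ha : a = 'c'
      · simp [PySem.Chars.count.go, List.isPrefixOf, ha, cIdxs, ih l _ hl]
        omega
      · have hne : ('c' == a) = false := by simp [Ne.symm ha]
        simp [PySem.Chars.count.go, List.isPrefixOf, hne, ha, cIdxs, ih l _ hl]

theorem count_c (d : List Char) : PySem.Chars.count d ['c'] = (cIdxs d).length := by
  simp [PySem.Chars.count, count_go_c d.length d 0 le_rfl]

-- the while loop produces exactly the 'c' indices from position k on
theorem findLoop_eq (word : String) : ∀ (m k : Nat), k ≤ word.toList.length →
    (cIdxs (word.toList.drop k)).length = m →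
    pvFindLoop word m (k : Int)
      = (cIdxs (word.toList.drop k)).map (fun j => ((k + j : Nat) : Int)) := by
  intro m
  induction m with
  | zero =>
    intro k hk hl
    rw [List.length_eq_zero_iff.mp hl]
    rfl
  | succ n ih =>
    intro k hk hl
    cases hc : cIdxs (word.toList.drop k) with
    | nil => rw [hc] at hl; simp at hl
    | cons j rest =>
      have hfind : PySem.Chars.find (word.toList.drop k) ['c'] = (j : Int) := by
        rw [find_c]; rw [hc]
      have hff : PySem.Str.findFrom word "c" (k : Int) none = ((k + j : Nat) : Int) := by
        rw [PySem.Str.findFrom_eq]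
        have := PySem.Chars.findFrom_natCast word.toList "c".toList k hk
        simp only [this]
        rw [show ("c".toList = ['c']) from rfl, hfind]
        simp

      have hjlt : j < (word.toList.drop k).length :=
        length_lt_of_mem_cIdxs _ j (by simp [hc])
      have hk1 : k + j + 1 ≤ word.toList.length := by
        rw [List.length_drop] at hjlt; omega
      have hrest : rest = (cIdxs ((word.toList.drop k).drop (j + 1))).map (· + (j + 1)) :=
        cIdxs_head_tail _ j rest hc
      have hdd : (word.toList.drop k).drop (j + 1) = word.toList.drop (k + j + 1) := by
        rw [List.drop_drop]; ring_nf
      have hlen : (cIdxs (word.toList.drop (k + j + 1))).length = n := by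
        rw [hc] at hl
        simp [hrest, hdd] at hl ⊢
        omega
      have hIH := ih (k + j + 1) hk1 hlen
      simp only [pvFindLoop]
      rw [hff]
      simp only [List.map_cons]
      congr 1
      have hcast : ((k + j : Nat) : Int) + 1 = ((k + j + 1 : Nat) : Int) := by push_cast; ring
      rw [hcast, hIH, hrest, hdd, List.map_map]
      apply List.map_congr_left
      intro x _
      simp [Function.comp]
      omega

-- the "next char is a/o/u" test, as A and B both decide it for an in-range 'c' index
def nextAou (cs : List Char) (j : Nat) : Bool :=
  match cs[j + 1]? with
  | some ch => ch == 'a' || ch == 'o' || ch == 'u'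
  | none => false

theorem nextAou_eq (cs : List Char) (j : Nat) :
    (cs[j + 1]? == some 'a' || cs[j + 1]? == some 'o' || cs[j + 1]? == some 'u')
      = nextAou cs j := by
  cases hch : cs[j + 1]? with
  | none => simp [nextAou, hch]
  | some ch => simp [nextAou, hch]

theorem a_foldl_eq_countP (word : String) :
    swap_c_for_k_check word = ((cIdxs word.toList).countP (nextAou word.toList) : Int) := by
  unfold swap_c_for_k_check
  dsimp only
  have h0 := findLoop_eq word (cIdxs word.toList).length 0 (Nat.zero_le _) (by simp)
  rw [Nat.cast_zero] at h0
  simp only [List.drop_zero, Nat.zero_add] at h0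
  rw [PySem.Str.count_eq, show ("c".toList = ['c']) from rfl, count_c, h0]
  simp only [List.foldl_map]
  rw [PySem.List.foldl_congr_mem
    (g := fun acc j => if nextAou word.toList j then acc + 1 else acc)]
  · rw [PySem.List.foldl_if_add_one]; simp
  · intro acc j hj
    have hjlt : j < word.toList.length := length_lt_of_mem_cIdxs _ j hj
    have hl2 : word.toList.length = word.length := by simp
    by_cases hlast : j + 1 = word.toList.length
    · have h1 : ((j : Int) == (PySem.Str.len word : Int) - 1) = true := by
        simp [PySem.Str.len_eq]; omega
      have hnone : word.toList[j + 1]? = none := by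
        rw [List.getElem?_eq_none_iff]; omega
      have h2 : nextAou word.toList j = false := by
        simp [nextAou, hnone]
      simp only [h1, h2, if_true, Bool.false_eq_true, if_false]
    · have h1 : ((j : Int) == (PySem.Str.len word : Int) - 1) = false := by
        simp [PySem.Str.len_eq]; omega
      have hget : PySem.Str.pyGet? word ((j : Int) + 1) = word.toList[j + 1]? := by
        rw [show ((j : Int) + 1 = ((j + 1 : Nat) : Int)) from by push_cast; ring,
          PySem.Str.pyGet?_natCast]
      simp only [h1, hget, Bool.false_eq_true, if_false, nextAou_eq]
  
theorem enumerate_countP_c (f : Int → Bool) : ∀ (cs : List Char) (st : Int),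
    (PySem.List.enumerate cs st).countP (fun p => p.2 == 'c' && f p.1)
      = (cIdxs cs).countP (fun (j : Nat) => f (st + (j : Int))) := by
  intro cs
  induction cs with
  | nil => intro st; simp [cIdxs]
  | cons a l ih =>
    intro st
    rw [PySem.List.enumerate_cons, List.countP_cons, ih (st + 1)]
    have h1 : ((fun j : Nat => f (st + (j : Int))) ∘ (· + 1))
        = (fun j : Nat => f (st + 1 + (j : Int))) := by
      funext x
      exact congrArg f (by push_cast; ring)
    have key : List.countP (fun j : Nat => f (st + 1 + (j : Int))) (cIdxs l)
        = List.countP ((fun j : Nat => f (st + (j : Int))) ∘ (· + 1)) (cIdxs l) :=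
      List.countP_congr (fun x _ => by
        have hx : st + 1 + (x : Int) = st + ((x + 1 : Nat) : Int) := by push_cast; ring
        simp only [Function.comp, hx])
    by_cases ha : a = 'c'
    · subst ha
      simp only [cIdxs, if_true]
      rw [List.countP_cons, List.countP_map, key]
      simp
    · have h2 : (a == 'c') = false := by simp [ha]
      simp only [cIdxs, if_neg ha]
      rw [List.countP_map, key]
      simp [h2]

theorem b_foldl_eq_countP (word : String) :
    swap_c_for_k_check_alt word
      = (((cIdxs word.toList).countP
           (fun (j : Nat) => decide ((j : Int) + 1 < (PySem.Str.len word : Int))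
             && ((PySem.Str.pyGet? word ((j : Int) + 1)).elim false
                   (fun ch => PySem.Chars.isIn [ch] "aou".toList)))) : Int) := by
  unfold swap_c_for_k_check_alt
  simp only [Bool.and_assoc]
  rw [PySem.List.foldl_if_add_one]
  have hb := enumerate_countP_c
      (fun i => decide (i + 1 < (PySem.Str.len word : Int))
        && ((PySem.Str.pyGet? word (i + 1)).elim false
              (fun ch => PySem.Chars.isIn [ch] "aou".toList)))
      word.toList 0
  simp only [zero_add] at hb
  rw [hb]
  simp

theorem isIn_singleton (ch : Char) (l : List Char) :
    PySem.Chars.isIn [ch] l = decide (ch ∈ l) := by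
  by_cases h : ch ∈ l
  · simp [h, (PySem.Chars.isIn_iff_infix _ _).mpr ((singleton_infix_iff ch l).mpr h)]
  · have hf : PySem.Chars.isIn [ch] l = false :=
      (PySem.Chars.isIn_eq_false_iff _ _).mpr (fun hinf => h ((singleton_infix_iff ch l).mp hinf))
    simp [h, hf]

-- ===== VERDICT (by name: the statement is the Claim_ definition above) =====
theorem swap_c_for_k_check_spec : Claim_equal_swap_c_for_k_check := by
  unfold Claim_equal_swap_c_for_k_check Spec_swap_c_for_k_check
  intro word _
  rw [a_foldl_eq_countP, b_foldl_eq_countP]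
  congr 1
  apply List.countP_congr
  intro j hj
  have hjlt : j < word.toList.length := length_lt_of_mem_cIdxs _ j hj
  have hl2 : word.toList.length = word.length := by simp
  by_cases hlast : j + 1 = word.toList.length
  · have hnone : word.toList[j + 1]? = none := by
      rw [List.getElem?_eq_none_iff]; omega
    have h2 : nextAou word.toList j = false := by
      simp [nextAou, hnone]
    have h3 : (decide ((j : Int) + 1 < (PySem.Str.len word : Int))) = false := by
      simp [PySem.Str.len_eq]; omega
    rw [h2, h3]
    simp
  · have hget : PySem.Str.pyGet? word ((j : Int) + 1) = word.toList[j + 1]? := by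
      rw [show ((j : Int) + 1 = ((j + 1 : Nat) : Int)) from by push_cast; ring,
        PySem.Str.pyGet?_natCast]
    have h3 : (decide ((j : Int) + 1 < (PySem.Str.len word : Int))) = true := by
      simp [PySem.Str.len_eq]; omega
    rw [hget, h3, Bool.true_and]
    cases hch : word.toList[j + 1]? with
    | none =>
      exfalso
      rw [List.getElem?_eq_none_iff] at hch
      omega
    | some ch =>
      simp [nextAou, hch, isIn_singleton, or_assoc]
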